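-- pv_equiv track=rewrite | github.com/Roozbeh-Abolpour/PolySOS | src/polysos/chordal_graph/ordering.py | lex_largest
-- ===== SOURCE A (Python) =====
-- def lex_largest(S):
--     sm=S[0]
--     J=0
--     for i in range(1,len(S)):
--         s=S[i]
--         flag=0
--         m=min(len(sm),len(s))
--         for j in range(m):
--             if s[j]>sm[j]:
--                 J=i
--                 sm=s
--                 flag=1
--                 break
--             elif s[j]<sm[j]:
--                 flag=-1
--                 break
--         if flag==0 and len(s)>len(sm):
--             J=i
--             sm=s
--     return J
-- ===== SOURCE B (Python) =====
-- def lex_largest(S):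
--     return S.index(max(S))
-- ===== Notes on version B (the rewrite author's own statement) =====
-- stated objective: idiomatic
-- what changed: Replaces the hand-written nested comparison loop (manual element-wise lexicographic compare with flags and breaks) by Python's built-in sequence comparison: return S.index(max(S)); both pick the earliest index of the lexicographically largest list.
-- outside the precondition, e.g. on lex_largest([]): A raises IndexError, B raises ValueError
import Mathlib
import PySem

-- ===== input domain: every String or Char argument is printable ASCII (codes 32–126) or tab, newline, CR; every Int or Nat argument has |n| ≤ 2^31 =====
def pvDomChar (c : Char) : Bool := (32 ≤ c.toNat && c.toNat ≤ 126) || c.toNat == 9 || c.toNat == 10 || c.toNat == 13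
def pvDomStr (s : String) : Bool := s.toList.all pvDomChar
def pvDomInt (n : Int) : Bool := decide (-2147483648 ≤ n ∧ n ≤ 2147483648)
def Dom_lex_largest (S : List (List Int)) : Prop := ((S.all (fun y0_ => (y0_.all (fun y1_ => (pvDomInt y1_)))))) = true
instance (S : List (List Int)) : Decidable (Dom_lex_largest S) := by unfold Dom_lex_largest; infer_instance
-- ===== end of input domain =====

-- ===== PORT A =====
-- B replaces A's hand-written flag/break comparison loop by max + index (idiomatic, same cost).
-- Python A raises IndexError on S = []; Pre_ excludes the empty list.

-- inner loop of A: for j in range(min(len sm, len s)): compare s[j] with sm[j], break with flag ±1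
def pvFlag : List Int → List Int → Int
  | [], _ => 0
  | _, [] => 0
  | b :: bs, a :: as => if b > a then 1 else if b < a then -1 else pvFlag bs as

-- outer loop of A over i in range(1, len S), state (sm, J)
def pvGoA : List (List Int) → List Int → Int → Int → Int
  | [], _, J, _ => J
  | s :: t, sm, J, i =>
      let f := pvFlag s sm
      if f = 1 then pvGoA t s i (i + 1)
      else if f = 0 ∧ s.length > sm.length then pvGoA t s i (i + 1)
      else pvGoA t sm J (i + 1)

def lex_largest (S : List (List Int)) : Int :=
  match S with
  | [] => 0            -- Python raises IndexError here; excluded by Pre_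
  | s0 :: rest => pvGoA rest s0 0 1

-- ===== PORT B =====
-- Source B: return S.index(max(S))
def lex_largest_alt (S : List (List Int)) : Int :=
  match PySem.List.max? S (fun y => y) with
  | none => 0          -- Python raises ValueError here; excluded by Pre_
  | some m =>
    match PySem.List.index? S m with
    | none => 0        -- unreachable: max? returns a member
    | some k => (k : Int)

-- ===== PRECONDITION & SPEC =====
-- Pre_ excludes only the empty list, on which A raises IndexError (and B raises ValueError).
def Pre_lex_largest (S : List (List Int)) : Prop := S ≠ []
instance (S : List (List Int)) : Decidable (Pre_lex_largest S) := by unfold Pre_lex_largest; infer_instance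
def pvWitness_lex_largest : List (List Int) := [[1, 2], [1, 2, 3], [0]]
def Spec_lex_largest (S : List (List Int)) (out : Int) : Prop := out = lex_largest_alt S
instance (S : List (List Int)) (out : Int) : Decidable (Spec_lex_largest S out) := by unfold Spec_lex_largest; infer_instance

-- ===== CLAIM (what is proved, stated in full; the proofs are below) =====
def Claim_equal_lex_largest : Prop := ∀ (S : List (List Int)), Dom_lex_largest S → Pre_lex_largest S → Spec_lex_largest S (lex_largest S)

-- ===== LEMMAS AND PROOFS =====

-- A's manual element-wise comparison decides exactly the lexicographic order on List Int
theorem pvFlag_lt_iff (a b : List Int) :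
    (pvFlag b a = 1 ∨ (pvFlag b a = 0 ∧ a.length < b.length)) ↔ a < b := by
  induction a generalizing b with
  | nil =>
    cases b with
    | nil => simp [pvFlag]
    | cons y bs => simp [pvFlag, List.nil_lt_cons]
  | cons x as ih =>
    cases b with
    | nil => simp [pvFlag, List.not_lt_nil]
    | cons y bs =>
      simp only [pvFlag, List.length_cons, List.cons_lt_cons_iff]
      by_cases h1 : y > x
      · simp [h1]
      · by_cases h2 : y < x
        · rw [if_neg h1, if_pos h2]
          constructor
          · rintro (h | ⟨h, _⟩) <;> exact absurd h (by decide)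
          · rintro (h | ⟨rfl, _⟩)
            · exact absurd h h1
            · exact absurd h2 (lt_irrefl x)
        · have hxy : x = y := le_antisymm (not_lt.mp h2) (not_lt.mp h1)
          subst hxy
          rw [if_neg h1, if_neg h2, Nat.add_lt_add_iff_right, ih bs]
          simp

-- A's outer loop computes: keep J if nothing beats sm, else i-offset of the first occurrence
-- of the running maximum
theorem pvGoA_spec (t : List (List Int)) :
    ∀ (sm : List Int) (J i : Int),
      pvGoA t sm J i =
        if t.foldl max sm = sm then J
        else i + ((t.idxOf (t.foldl max sm) : Nat) : Int) := by
  induction t with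
  | nil => intro sm J i; simp [pvGoA]
  | cons s t ih =>
    intro sm J i
    by_cases hlt : sm < s
    · have hstep : pvGoA (s :: t) sm J i = pvGoA t s i (i + 1) := by
        rcases (pvFlag_lt_iff sm s).mpr hlt with h | ⟨h0, hl⟩
        · simp [pvGoA, h]
        · by_cases h1 : pvFlag s sm = 1
          · simp [pvGoA, h1]
          · simp [pvGoA, h0, hl]
      have hmax : max sm s = s := max_eq_right (le_of_lt hlt)
      have hM : s ≤ List.foldl max s t := (PySem.List.le_foldl_max t s).1
      have hne : List.foldl max s t ≠ sm := by
        intro h; exact absurd (lt_of_lt_of_le hlt hM) (by rw [h]; exact lt_irrefl sm)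
      rw [hstep, ih s i (i + 1)]
      simp only [List.foldl_cons, hmax, if_neg hne]
      by_cases hs : List.foldl max s t = s
      · rw [if_pos hs, hs, List.idxOf_cons_self]
        simp
      · rw [if_neg hs, List.idxOf_cons_ne t (fun h => hs h.symm)]
        push_cast
        ring
    · have hstep : pvGoA (s :: t) sm J i = pvGoA t sm J (i + 1) := by
        have hf1 : pvFlag s sm ≠ 1 := by
          intro h; exact hlt ((pvFlag_lt_iff sm s).mp (Or.inl h))
        have hf0 : ¬ (pvFlag s sm = 0 ∧ s.length > sm.length) := by
          rintro ⟨h0, hl⟩; exact hlt ((pvFlag_lt_iff sm s).mp (Or.inr ⟨h0, hl⟩))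
        simp only [pvGoA, if_neg hf1, if_neg hf0]
      have hmax : max sm s = sm := max_eq_left (not_lt.mp hlt)
      rw [hstep, ih sm J (i + 1)]
      simp only [List.foldl_cons, hmax]
      by_cases hM : List.foldl max sm t = sm
      · simp [hM]
      · have hsm : sm ≤ List.foldl max sm t := (PySem.List.le_foldl_max t sm).1
        have hMne : List.foldl max sm t ≠ s := by
          intro h
          have hs_le : List.foldl max sm t ≤ sm := h ▸ not_lt.mp hlt
          exact hM (le_antisymm hs_le hsm)
        simp only [if_neg hM]
        rw [List.idxOf_cons_ne t (fun h => hMne h.symm)]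
        push_cast
        ring

-- first occurrence: idxOf? agrees with idxOf on members
theorem idxOf?_eq_some_idxOf (l : List (List Int)) (v : List Int) (h : v ∈ l) :
    List.idxOf? v l = some (List.idxOf v l) := by
  induction l with
  | nil => cases h
  | cons x t ih =>
    by_cases hx : x = v
    · subst hx; simp [List.idxOf?_cons]
    · rw [List.mem_cons] at h
      simp [List.idxOf?_cons, hx, ih (h.resolve_left (fun hh => hx hh.symm))]

-- ===== VERDICT (by name: the statement is the Claim_ definition above) =====
theorem lex_largest_spec : Claim_equal_lex_largest := by
  intro S _ hpre
  unfold Spec_lex_largest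
  match S with
  | [] => exact absurd rfl hpre
  | s0 :: rest =>
    have hmax : PySem.List.max? (s0 :: rest) (fun y => y) = some (List.foldl max s0 rest) :=
      by convert PySem.List.max?_id_cons s0 rest using 2
    have hmem : List.foldl max s0 rest ∈ s0 :: rest := List.max?_mem rfl
    have hidx : PySem.List.index? (s0 :: rest) (List.foldl max s0 rest)
        = some (List.idxOf (List.foldl max s0 rest) (s0 :: rest)) := by
      rw [PySem.List.index?_eq_idxOf?]
      exact idxOf?_eq_some_idxOf _ _ hmem
    simp only [lex_largest, lex_largest_alt, hmax, hidx]
    rw [pvGoA_spec rest s0 0 1]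
    by_cases hs : List.foldl max s0 rest = s0
    · rw [if_pos hs, hs, List.idxOf_cons_self]
      simp
    · rw [if_neg hs, List.idxOf_cons_ne rest (fun h => hs h.symm)]
      push_cast
      ring
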